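-- pv_equiv track=rewrite | github.com/omniviser/hexDAG | hexai/app/domain/services/relationship_service.py | find_path_tables
-- ===== SOURCE A (Python) =====
-- from collections import defaultdict, deque
--
-- def find_path_tables(
--     start_table: str, end_table: str, graph: dict[str, set[str]]
-- ) -> set[str]:
--     """Find all tables in the shortest path between two tables.
--
--     Args
--     ----
--     start_table: Starting table name
--     end_table: Ending table name
--     graph: Relationship graph
--
--     Returns
--     -------
--     Set of table names in the path (including start and end)
--     """
--     if start_table == end_table:
--         return {start_table}
--
--     if start_table not in graph or end_table not in graph:
--         return set()
--
--     # BFS to find shortest path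
--     queue = deque([(start_table, [start_table])])
--     visited = {start_table}
--
--     while queue:
--         current_table, path = queue.popleft()
--
--         if current_table == end_table:
--             return set(path)
--
--         for neighbor in graph.get(current_table, set()):
--             if neighbor not in visited:
--                 visited.add(neighbor)
--                 queue.append((neighbor, path + [neighbor]))
--
--     return set()  # No path found
-- ===== SOURCE B (Python) =====
-- from collections import deque
--
-- def find_path_tables(start_table, end_table, graph):
--     """Same result as A, but BFS stores one parent pointer per node instead of
--     copying the whole path onto every queue entry; the path is rebuilt once at
--     the end from the parent pointers."""
--     if start_table == end_table:
--         return {start_table}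
--
--     if start_table not in graph or end_table not in graph:
--         return set()
--
--     parent = {}
--     visited = {start_table}
--     queue = deque([start_table])
--     found = False
--     while queue:
--         current = queue.popleft()
--         if current == end_table:
--             found = True
--             break
--         for neighbor in graph.get(current, set()):
--             if neighbor not in visited:
--                 visited.add(neighbor)
--                 parent[neighbor] = current
--                 queue.append(neighbor)
--
--     if not found:
--         return set()
--
--     path = []
--     node = end_table
--     while node != start_table:
--         path.append(node)
--         node = parent[node]
--     path.append(start_table)
--     return set(reversed(path))
-- ===== Notes on version B (the rewrite author's own statement) =====
-- stated objective: alternative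
-- what changed: A's BFS copies the whole path into every queue entry; B's BFS stores a single parent pointer per discovered node and reconstructs the path once at the end.
import Mathlib
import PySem

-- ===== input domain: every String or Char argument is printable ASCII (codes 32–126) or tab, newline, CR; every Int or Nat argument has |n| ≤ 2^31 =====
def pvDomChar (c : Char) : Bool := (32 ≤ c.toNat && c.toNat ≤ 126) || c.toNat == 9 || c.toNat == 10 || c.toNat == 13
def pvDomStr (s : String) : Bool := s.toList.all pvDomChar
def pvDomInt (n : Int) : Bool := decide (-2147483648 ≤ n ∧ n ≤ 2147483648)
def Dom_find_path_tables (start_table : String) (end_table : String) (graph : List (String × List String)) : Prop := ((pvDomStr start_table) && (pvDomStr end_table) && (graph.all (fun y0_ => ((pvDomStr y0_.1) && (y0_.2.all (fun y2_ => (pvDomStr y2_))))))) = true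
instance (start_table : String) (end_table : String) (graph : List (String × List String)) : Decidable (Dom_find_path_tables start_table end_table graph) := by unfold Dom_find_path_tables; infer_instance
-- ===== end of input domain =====

-- B replaces A's BFS that copies the whole path onto every queue entry by a BFS with
-- parent pointers plus one final path reconstruction (an alternative algorithm; return value proved equal).


-- shared fuel bound: one unit per possible BFS enqueue (1 for the start + every
-- neighbour occurrence); the loops of both Pythons pop at most this many times
def pvFuel (graph : List (String × List String)) : Nat :=
  graph.foldl (fun a p => a + p.2.length) 0 + 1

-- ===== PORT A =====
-- the 'while queue:' loop of A; state = (queue of (node, path), visited)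
def fptA_loop (end_table : String) (g : PySem.Dict String (List String)) :
    Nat → List (String × List String) → PySem.Set String → List String
  | 0, _, _ => []
  | fuel+1, queue, visited =>
    match queue with
    | [] => []
    | (current_table, path) :: rest =>
      if current_table = end_table then PySem.Set.ofList path
      else
        let st := (g.getD current_table []).foldl
          (fun (s : List (String × List String) × PySem.Set String) neighbor =>
            if neighbor ∈ s.2 then s
            else (s.1 ++ [(neighbor, path ++ [neighbor])], PySem.Set.add s.2 neighbor))
          (rest, visited)
        fptA_loop end_table g fuel st.1 st.2

def find_path_tables (start_table : String) (end_table : String) (graph : List (String × List String)) : List String :=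
  if start_table = end_table then PySem.Set.ofList [start_table]
  else
    let g : PySem.Dict String (List String) := PySem.Dict.mk graph
    if !(g.contains start_table) || !(g.contains end_table) then []
    else fptA_loop end_table g (pvFuel graph)
      [(start_table, [start_table])] (PySem.Set.add PySem.Set.empty start_table)

-- ===== PORT B =====
-- the BFS loop of B; state = (queue of nodes, visited, parent); 'some parent' = found
def fptB_loop (end_table : String) (g : PySem.Dict String (List String)) :
    Nat → List String → PySem.Set String → PySem.Dict String String →
    Option (PySem.Dict String String)
  | 0, _, _, _ => none
  | fuel+1, queue, visited, parent =>
    match queue with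
    | [] => none
    | current :: rest =>
      if current = end_table then some parent
      else
        let st := (g.getD current []).foldl
          (fun (s : List String × PySem.Set String × PySem.Dict String String) neighbor =>
            if neighbor ∈ s.2.1 then s
            else (s.1 ++ [neighbor], PySem.Set.add s.2.1 neighbor, s.2.2.insert neighbor current))
          (rest, visited, parent)
        fptB_loop end_table g fuel st.1 st.2.1 st.2.2

-- the reconstruction loop of B: walk parent pointers from end to start, then reverse
def fptB_recon (start_table : String) (parent : PySem.Dict String String) :
    Nat → String → List String → List String
  | 0, _, _ => []            -- fuel exhausted (unreachable: the chain is shorter than the fuel)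
  | f+1, node, acc =>
    if node = start_table then (acc ++ [node]).reverse
    else match parent.get? node with
      | some m => fptB_recon start_table parent f m (acc ++ [node])
      | none => []           -- KeyError in Python (unreachable when the loop reported 'found')

def find_path_tables_alt (start_table : String) (end_table : String) (graph : List (String × List String)) : List String :=
  if start_table = end_table then PySem.Set.ofList [start_table]
  else
    let g : PySem.Dict String (List String) := PySem.Dict.mk graph
    if !(g.contains start_table) || !(g.contains end_table) then []
    else
      match fptB_loop end_table g (pvFuel graph)
          [start_table] (PySem.Set.add PySem.Set.empty start_table) PySem.Dict.empty with
      | none => []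
      | some parent =>
        PySem.Set.ofList (fptB_recon start_table parent (parent.size + 1) end_table [])

-- ===== PRECONDITION & SPEC =====
def Spec_find_path_tables (start_table : String) (end_table : String) (graph : List (String × List String)) (out : List String) : Prop := out = find_path_tables_alt start_table end_table graph
instance (start_table : String) (end_table : String) (graph : List (String × List String)) (out : List String) : Decidable (Spec_find_path_tables start_table end_table graph out) := by unfold Spec_find_path_tables; infer_instance

-- ===== CLAIM (what is proved, stated in full; the proofs are below) =====
def Claim_equal_find_path_tables : Prop := ∀ (start_table : String) (end_table : String) (graph : List (String × List String)), Dom_find_path_tables start_table end_table graph → Spec_find_path_tables start_table end_table graph (find_path_tables start_table end_table graph)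

-- ===== LEMMAS AND PROOFS =====

-- 'p is the parent chain of n': the discovery path the parent dict encodes
inductive Chain (start : String) (parent : PySem.Dict String String) : String → List String → Prop
  | base : Chain start parent start [start]
  | step {n m : String} {p : List String} (hne : n ≠ start)
      (hget : parent.get? n = some m) (hc : Chain start parent m p) :
      Chain start parent n (p ++ [n])

-- one queue entry's joint invariant over A's (node, path) and B's parent dict
def InvEntry (start : String) (parent : PySem.Dict String String)
    (visited : PySem.Set String) (np : String × List String) : Prop :=
  Chain start parent np.1 np.2 ∧ (∀ x ∈ np.2, x ∈ visited) ∧ np.2.Nodup ∧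
    (∀ x ∈ np.2, x ≠ start → x ∈ parent.keys)

lemma chain_insert {start : String} {parent : PySem.Dict String String}
    {n : String} {p : List String} (h : Chain start parent n p)
    {k v : String} (hk : k ∉ p) : Chain start (parent.insert k v) n p := by
  induction h with
  | base => exact Chain.base
  | step hne hget hc ih =>
    rename_i n' m p' 
    have hkn : n' ≠ k := by
      intro he; exact hk (by simp [he])
    exact Chain.step hne
      (by rw [PySem.Dict.get?_insert_of_ne _ _ hkn]; exact hget)
      (ih (fun hm => hk (by simp [hm])))

lemma chain_recon {start : String} {parent : PySem.Dict String String}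
    {n : String} {p : List String} (h : Chain start parent n p) :
    ∀ f, p.length ≤ f → ∀ acc, fptB_recon start parent f n acc = p ++ acc.reverse := by
  induction h with
  | base =>
    intro f hf acc
    match f, hf with
    | 0, hf => simp at hf
    | f+1, _ => simp [fptB_recon]
  | step hne hget hc ih =>
    rename_i n' m p'
    intro f hf acc
    match f, hf with
    | 0, hf => simp at hf
    | f+1, hf =>
      have : p'.length ≤ f := by simpa using hf
      simp only [fptB_recon, if_neg hne, hget]
      rw [ih f this]
      simp

lemma nodup_length_le {p l : List String} (hp : p.Nodup) (hsub : ∀ x ∈ p, x ∈ l) :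
    p.length ≤ l.length :=
  (hp.subperm (fun _ hx => hsub _ hx)).length_le

-- an existing queue entry's invariant survives discovering a fresh node k
lemma InvEntry_mono {start k v : String} {parent : PySem.Dict String String}
    {visited : PySem.Set String} {np : String × List String}
    (h : InvEntry start parent visited np) (hk : k ∉ visited) :
    InvEntry start (parent.insert k v) (PySem.Set.add visited k) np := by
  obtain ⟨hc, hv, hnd, hkeys⟩ := h
  refine ⟨chain_insert hc (fun hm => hk (hv _ hm)), fun x hx => ?_, hnd, fun x hx hxs => ?_⟩
  · exact (PySem.Set.mem_add _ _ _).2 (Or.inl (hv _ hx))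
  · exact (PySem.Dict.mem_keys_insert _ _ _ _).2 (Or.inr (hkeys _ hx hxs))

-- the inner 'for neighbor in …' loops of A and B run in lockstep
lemma fold_sync (start cur : String) (path : List String) :
    ∀ (ns : List String) (q : List (String × List String)) (visited : PySem.Set String)
      (parent : PySem.Dict String String),
      start ∈ visited → parent.keys.Nodup → start ∉ parent.keys →
      InvEntry start parent visited (cur, path) →
      (∀ np ∈ q, InvEntry start parent visited np) →
      (ns.foldl
          (fun (s : List String × PySem.Set String × PySem.Dict String String) neighbor =>
            if neighbor ∈ s.2.1 then s
            else (s.1 ++ [neighbor], PySem.Set.add s.2.1 neighbor, s.2.2.insert neighbor cur))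
          (q.map Prod.fst, visited, parent)).1 =
        (ns.foldl
          (fun (s : List (String × List String) × PySem.Set String) neighbor =>
            if neighbor ∈ s.2 then s
            else (s.1 ++ [(neighbor, path ++ [neighbor])], PySem.Set.add s.2 neighbor))
          (q, visited)).1.map Prod.fst ∧
      (ns.foldl
          (fun (s : List String × PySem.Set String × PySem.Dict String String) neighbor =>
            if neighbor ∈ s.2.1 then s
            else (s.1 ++ [neighbor], PySem.Set.add s.2.1 neighbor, s.2.2.insert neighbor cur))
          (q.map Prod.fst, visited, parent)).2.1 =
        (ns.foldl
          (fun (s : List (String × List String) × PySem.Set String) neighbor =>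
            if neighbor ∈ s.2 then s
            else (s.1 ++ [(neighbor, path ++ [neighbor])], PySem.Set.add s.2 neighbor))
          (q, visited)).2 ∧
      (let parent' := (ns.foldl
          (fun (s : List String × PySem.Set String × PySem.Dict String String) neighbor =>
            if neighbor ∈ s.2.1 then s
            else (s.1 ++ [neighbor], PySem.Set.add s.2.1 neighbor, s.2.2.insert neighbor cur))
          (q.map Prod.fst, visited, parent)).2.2
       let sA := (ns.foldl
          (fun (s : List (String × List String) × PySem.Set String) neighbor =>
            if neighbor ∈ s.2 then s
            else (s.1 ++ [(neighbor, path ++ [neighbor])], PySem.Set.add s.2 neighbor))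
          (q, visited))
       start ∈ sA.2 ∧ parent'.keys.Nodup ∧ start ∉ parent'.keys ∧
         (∀ np ∈ sA.1, InvEntry start parent' sA.2 np)) := by
  intro ns
  induction ns with
  | nil =>
    intro q visited parent hs hnd hns hcur hq
    exact ⟨rfl, rfl, hs, hnd, hns, hq⟩
  | cons n ns ih =>
    intro q visited parent hs hnd hns hcur hq
    simp only [List.foldl_cons]
    by_cases hmem : n ∈ visited
    · simp only [if_pos hmem]
      exact ih q visited parent hs hnd hns hcur hq
    · simp only [if_neg hmem]
      have hstartn : start ≠ n := fun he => hmem (he ▸ hs)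
      have hcur' : InvEntry start (parent.insert n cur) (PySem.Set.add visited n) (cur, path) :=
        InvEntry_mono hcur hmem
      have hnew : InvEntry start (parent.insert n cur) (PySem.Set.add visited n) (n, path ++ [n]) := by
        obtain ⟨hc, hv, hnd2, hk2⟩ := hcur
        have hnp : n ∉ path := fun hm => hmem (hv _ hm)
        have hchain : Chain start (parent.insert n cur) n (path ++ [n]) :=
          Chain.step (fun he => hmem (by rw [he]; exact hs)) (PySem.Dict.get?_insert_self _ _ _)
            (chain_insert hc hnp)
        refine ⟨hchain, ?_, ?_, ?_⟩
        · intro x hx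
          rcases List.mem_append.1 hx with hx | hx
          · exact (PySem.Set.mem_add _ _ _).2 (Or.inl (hv _ hx))
          · exact (PySem.Set.mem_add _ _ _).2 (Or.inr (List.mem_singleton.1 hx))
        · simpa [List.nodup_append] using ⟨hnd2, fun a ha hb => hnp (hb ▸ ha)⟩
        · intro x hx hxs
          rcases List.mem_append.1 hx with hx | hx
          · exact (PySem.Dict.mem_keys_insert _ _ _ _).2 (Or.inr (hk2 _ hx hxs))
          · exact (PySem.Dict.mem_keys_insert _ _ _ _).2 (Or.inl (List.mem_singleton.1 hx))
      have hq' : ∀ np ∈ q ++ [(n, path ++ [n])],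
          InvEntry start (parent.insert n cur) (PySem.Set.add visited n) np := by
        intro np hnp
        rcases List.mem_append.1 hnp with hnp | hnp
        · exact InvEntry_mono (hq _ hnp) hmem
        · exact (List.mem_singleton.1 hnp) ▸ hnew
      have hs' : start ∈ PySem.Set.add visited n := (PySem.Set.mem_add _ _ _).2 (Or.inl hs)
      have hnd' : (parent.insert n cur).keys.Nodup := PySem.Dict.nodup_keys_insert _ _ _ hnd
      have hns' : start ∉ (parent.insert n cur).keys := by
        intro hmemk
        rcases (PySem.Dict.mem_keys_insert _ _ _ _).1 hmemk with he | he
        · exact hstartn he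
        · exact hns he
      have := ih (q ++ [(n, path ++ [n])]) (PySem.Set.add visited n) (parent.insert n cur)
        hs' hnd' hns' hcur' hq'
      simpa [List.map_append] using this

-- the two BFS loops agree, given the joint invariant
lemma loop_agree (start endt : String) (g : PySem.Dict String (List String)) :
    ∀ (fuel : Nat) (qA : List (String × List String)) (visited : PySem.Set String)
      (parent : PySem.Dict String String),
      start ∈ visited → parent.keys.Nodup → start ∉ parent.keys →
      (∀ np ∈ qA, InvEntry start parent visited np) →
      fptA_loop endt g fuel qA visited =
        (match fptB_loop endt g fuel (qA.map Prod.fst) visited parent with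
         | none => []
         | some par => PySem.Set.ofList (fptB_recon start par (par.size + 1) endt [])) := by
  intro fuel
  induction fuel with
  | zero => intro qA visited parent _ _ _ _; simp [fptA_loop, fptB_loop]
  | succ fuel ih =>
    intro qA visited parent hs hnd hns hq
    match qA with
    | [] => simp [fptA_loop, fptB_loop]
    | (cur, path) :: rest =>
      simp only [fptA_loop, fptB_loop, List.map_cons]
      by_cases hend : cur = endt
      · simp only [if_pos hend]
        obtain ⟨hc, hv, hndp, hk⟩ := hq (cur, path) (by simp)
        have hlen : path.length ≤ parent.size + 1 := by
          have hsub : ∀ x ∈ path, x ∈ start :: parent.keys := by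
            intro x hx
            by_cases hxs : x = start
            · simp [hxs]
            · exact List.mem_cons_of_mem _ (hk _ hx hxs)
          have := nodup_length_le hndp hsub
          simpa [PySem.Dict.size, PySem.Dict.keys] using this
        rw [chain_recon (hend ▸ hc) _ hlen]
        simp
      · simp only [if_neg hend]
        obtain ⟨h1, h2, h3, h4, h5, h6⟩ := fold_sync start cur path (g.getD cur []) rest
          visited parent hs hnd hns (hq (cur, path) (by simp)) (fun np hnp => hq np (by simp [hnp]))
        rw [h1, h2]
        exact ih _ _ _ h3 h4 h5 h6

-- ===== VERDICT (by name: the statement is the Claim_ definition above) =====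
theorem find_path_tables_spec : Claim_equal_find_path_tables := by
  unfold Claim_equal_find_path_tables
  intro start_table end_table graph _
  unfold Spec_find_path_tables find_path_tables find_path_tables_alt
  by_cases heq : start_table = end_table
  · simp [heq]
  · simp only [if_neg heq]
    split_ifs with hcont
    · rfl
    · apply loop_agree
      · exact (PySem.Set.mem_add _ _ _).2 (Or.inr rfl)
      · exact PySem.Dict.nodup_keys_empty
      · simp [PySem.Dict.keys, PySem.Dict.empty]
      · intro np hnp
        rw [List.mem_singleton.1 hnp]
        refine ⟨Chain.base, ?_, by simp, ?_⟩
        · intro x hx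
          rw [List.mem_singleton.1 hx]
          exact (PySem.Set.mem_add _ _ _).2 (Or.inr rfl)
        · intro x hx hxs
          exact absurd (List.mem_singleton.1 hx) hxs
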